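-- pv_equiv track=rewrite | github.com/serina-robinson/adenylpred | lib/get_34_aa_signature.py | build_position_list
-- ===== SOURCE A (Python) =====
-- from typing import Any, Dict, List, Tuple, Optional, List, Set
--
-- def build_position_list(positions: List[int], reference_seq: str) -> List[int]:
--     """ Adjusts a list of positions to account for gaps in the reference sequence
--
--         Arguments:
--             positions: a list of ints that represent positions of interest in
--                        the reference sequence
--             reference_seq: the (aligned) reference sequence
--
--         Returns:
--             a new list of positions, each >= the original position
--     """
--     poslist = []
--     position = 0
--     for i, ref in enumerate(reference_seq):
--         if ref != "-":
--             if position in positions: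
--                 poslist.append(i)
--             position += 1
--     return poslist
-- ===== SOURCE B (Python) =====
-- def build_position_list(positions, reference_seq):
--     """ Adjusts a list of positions to account for gaps in the reference sequence """
--     index_map = [i for i, ref in enumerate(reference_seq) if ref != "-"]
--     return sorted(index_map[p] for p in set(positions) if 0 <= p < len(index_map))
-- ===== Notes on version B (the rewrite author's own statement) =====
-- stated objective: faster
-- what changed: B precomputes a gap-free index table once and gathers over the (deduplicated) requested positions with a final sort, instead of scanning the reference with an 'in positions' linear membership test at every non-gap character.
import Mathlib
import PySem

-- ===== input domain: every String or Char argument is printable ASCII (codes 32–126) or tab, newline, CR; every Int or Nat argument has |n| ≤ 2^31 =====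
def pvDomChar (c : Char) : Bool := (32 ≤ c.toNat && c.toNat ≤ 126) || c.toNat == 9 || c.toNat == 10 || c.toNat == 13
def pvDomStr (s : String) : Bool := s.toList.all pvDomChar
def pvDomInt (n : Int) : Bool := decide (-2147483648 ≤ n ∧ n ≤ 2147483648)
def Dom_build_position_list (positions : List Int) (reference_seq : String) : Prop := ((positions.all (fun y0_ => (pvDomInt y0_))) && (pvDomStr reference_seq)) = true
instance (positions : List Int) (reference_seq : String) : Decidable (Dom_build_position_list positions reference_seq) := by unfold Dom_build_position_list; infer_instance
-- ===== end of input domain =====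

-- B builds a gap-free index table once and gathers over the deduplicated requested
-- positions with a final sort, instead of scanning the reference with a running counter
-- and a linear membership test per non-gap character (objective: faster; measured).

-- ===== PORT A =====
def build_position_list (positions : List Int) (reference_seq : String) : List Int :=
  ((PySem.List.enumerate reference_seq.toList 0).foldl
    (fun (st : List Int × Int) ic =>
      if ic.2 ≠ '-' then
        ((if st.2 ∈ positions then st.1 ++ [ic.1] else st.1), st.2 + 1)
      else st)
    ([], 0)).1

-- ===== PORT B =====
def build_position_list_alt (positions : List Int) (reference_seq : String) : List Int :=
  let index_map : List Int :=
    (PySem.List.enumerate reference_seq.toList 0).filterMap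
      (fun ic => if ic.2 ≠ '-' then some ic.1 else none)
  PySem.List.sorted
    ((PySem.Set.ofList positions).filterMap
      (fun p => if 0 ≤ p ∧ p < (index_map.length : Int) then PySem.List.pyGet? index_map p else none))
    (fun x => x) false

-- ===== PRECONDITION & SPEC =====
def Spec_build_position_list (positions : List Int) (reference_seq : String) (out : List Int) : Prop := out = build_position_list_alt positions reference_seq
instance (positions : List Int) (reference_seq : String) (out : List Int) : Decidable (Spec_build_position_list positions reference_seq out) := by unfold Spec_build_position_list; infer_instance

-- ===== CLAIM (what is proved, stated in full; the proofs are below) =====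
def Claim_equal_build_position_list : Prop := ∀ (positions : List Int) (reference_seq : String), Dom_build_position_list positions reference_seq → Spec_build_position_list positions reference_seq (build_position_list positions reference_seq)

-- ===== LEMMAS AND PROOFS =====

-- aligned indices (starting at s) of the non-gap characters
def pvImap : List Char → Int → List Int
  | [], _ => []
  | c :: cs, s => if c ≠ '-' then s :: pvImap cs (s + 1) else pvImap cs (s + 1)

-- A's selection: keep im[r] when the ungapped rank (cnt + r) is in positions, in order
def pvPick (positions : List Int) : List Int → Int → List Int
  | [], _ => []
  | i :: is, cnt => (if cnt ∈ positions then [i] else []) ++ pvPick positions is (cnt + 1)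

theorem pvImap_lb (cs : List Char) (s : Int) : ∀ x ∈ pvImap cs s, s ≤ x := by
  induction cs generalizing s with
  | nil => simp [pvImap]
  | cons c cs ih =>
    intro x hx
    simp only [pvImap] at hx
    split at hx
    · rcases List.mem_cons.mp hx with h | h
      · omega
      · have := ih (s + 1) x h; omega
    · have := ih (s + 1) x hx; omega

theorem pvImap_pairwise (cs : List Char) (s : Int) : (pvImap cs s).Pairwise (· < ·) := by
  induction cs generalizing s with
  | nil => simp [pvImap]
  | cons c cs ih =>
    simp only [pvImap]
    split
    · exact List.pairwise_cons.mpr ⟨fun x hx => by have := pvImap_lb cs (s + 1) x hx; omega, ih (s + 1)⟩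
    · exact ih (s + 1)

theorem pvPick_sublist (positions : List Int) (im : List Int) (cnt : Int) :
    (pvPick positions im cnt).Sublist im := by
  induction im generalizing cnt with
  | nil => simp [pvPick]
  | cons i is ih =>
    simp only [pvPick]
    split
    · simpa using (ih (cnt + 1)).cons₂ i
    · simpa using (ih (cnt + 1)).cons i

theorem pvMem_pick (positions : List Int) (im : List Int) (cnt : Int) (v : Int) :
    v ∈ pvPick positions im cnt ↔
      ∃ (r : Nat) (h : r < im.length), im[r] = v ∧ (cnt + (r : Int)) ∈ positions := by
  induction im generalizing cnt with
  | nil => simp [pvPick]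
  | cons i is ih =>
    simp only [pvPick, List.mem_append, ih]
    constructor
    · rintro (h | ⟨r, hr, hv, hp⟩)
      · refine ⟨0, by simp, ?_, ?_⟩
        · split at h <;> simp_all
        · split at h <;> simp_all
      · refine ⟨r + 1, by simpa using hr, by simpa using hv, ?_⟩
        have h : cnt + ((r : Int) + 1) = cnt + 1 + (r : Int) := by ring
        push_cast
        rw [h]; exact hp
    · rintro ⟨r, hr, hv, hp⟩
      cases r with
      | zero => left; simp at hv hp; simp [hp, hv]
      | succ r =>
        right
        refine ⟨r, by simpa using hr, by simpa using hv, ?_⟩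
        have h : cnt + 1 + (r : Int) = cnt + ((r : Int) + 1) := by ring
        push_cast at hp ⊢
        rw [h]; exact hp

-- A's fold equals pvPick over the index table
theorem pvA_fold (positions : List Int) (cs : List Char) (s : Int) (acc : List Int) (cnt : Int) :
    ((PySem.List.enumerate cs s).foldl
      (fun (st : List Int × Int) ic =>
        if ic.2 ≠ '-' then
          ((if st.2 ∈ positions then st.1 ++ [ic.1] else st.1), st.2 + 1)
        else st)
      (acc, cnt)).1 = acc ++ pvPick positions (pvImap cs s) cnt := by
  induction cs generalizing s acc cnt with
  | nil => simp [pvImap, pvPick, PySem.List.enumerate_nil]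
  | cons c cs ih =>
    rw [PySem.List.enumerate_cons]
    simp only [List.foldl_cons, pvImap]
    by_cases hc : c = '-'
    · have h := ih (s + 1) acc cnt
      simp only [ne_eq, ite_not] at h
      simp [hc, h]
    · by_cases hp : cnt ∈ positions
      · have h := ih (s + 1) (acc ++ [s]) (cnt + 1)
        simp only [ne_eq, ite_not] at h
        simp [hc, hp, h, pvPick]
      · have h := ih (s + 1) acc (cnt + 1)
        simp only [ne_eq, ite_not] at h
        simp [hc, hp, h, pvPick]

-- B's table comprehension equals pvImap
theorem pvB_imap (cs : List Char) (s : Int) :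
    (PySem.List.enumerate cs s).filterMap (fun ic => if ic.2 ≠ '-' then some ic.1 else none)
      = pvImap cs s := by
  induction cs generalizing s with
  | nil => simp [pvImap, PySem.List.enumerate_nil]
  | cons c cs ih =>
    rw [PySem.List.enumerate_cons]
    have h := ih (s + 1)
    simp only [ne_eq, ite_not] at h
    by_cases hc : c = '-' <;> simp [pvImap, hc, h]

-- the sorted gather over set(positions) equals A's in-order selection
theorem pvSorted_gather (positions : List Int) (im : List Int) (him : im.Pairwise (· < ·)) :
    PySem.List.sorted
      ((PySem.Set.ofList positions).filterMap
        (fun p => if 0 ≤ p ∧ p < (im.length : Int) then PySem.List.pyGet? im p else none))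
      (fun x => x) false = pvPick positions im 0 := by
  have hnodup : im.Nodup := him.imp (fun h => ne_of_lt h)
  apply PySem.List.sorted_eq_of_perm_of_pairwise_lt
  · -- permutation
    have hn1 : (pvPick positions im 0).Nodup := hnodup.sublist (pvPick_sublist positions im 0)
    have hn2 : (((PySem.Set.ofList positions).filterMap
        (fun p => if 0 ≤ p ∧ p < (im.length : Int) then PySem.List.pyGet? im p else none))).Nodup := by
      apply List.Nodup.filterMap ?_ (PySem.Set.nodup_ofList positions)
      intro a a' b hb hb'
      split at hb
      · split at hb'
        · rename_i ha ha'
          rw [Option.mem_def] at hb hb'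
          rw [PySem.List.pyGet?_eq_some_getElem im ha.1 ha.2] at hb
          rw [PySem.List.pyGet?_eq_some_getElem im ha'.1 ha'.2] at hb'
          simp only [Option.some.injEq] at hb hb'
          have : a.toNat = a'.toNat := hnodup.getElem_inj_iff.mp (hb.trans hb'.symm)
          omega
        · simp at hb'
      · simp at hb
    rw [List.perm_ext_iff_of_nodup hn1 hn2]
    intro v
    rw [pvMem_pick]
    simp only [List.mem_filterMap, PySem.Set.mem_ofList]
    constructor
    · rintro ⟨r, hr, hv, hp⟩
      refine ⟨(r : Int), by simpa using hp, ?_⟩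
      rw [if_pos ⟨by positivity, by exact_mod_cast hr⟩,
        PySem.List.pyGet?_eq_some_getElem im (by positivity) (by exact_mod_cast hr)]
      simp [hv]
    · rintro ⟨p, hp, hv⟩
      split at hv
      · rename_i ha
        rw [PySem.List.pyGet?_eq_some_getElem im ha.1 ha.2] at hv
        refine ⟨p.toNat, by omega, by simpa using hv, ?_⟩
        have : (0 : Int) + (p.toNat : Int) = p := by omega
        rwa [this]
      · simp at hv
  · -- strictly increasing
    exact (him.sublist (pvPick_sublist positions im 0)).imp (fun h => h)

-- ===== VERDICT (by name: the statement is the Claim_ definition above) =====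
theorem build_position_list_spec : Claim_equal_build_position_list := by
  intro positions reference_seq _
  unfold Spec_build_position_list build_position_list build_position_list_alt
  rw [pvA_fold, pvB_imap, pvSorted_gather positions _ (pvImap_pairwise _ _)]
  simp
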